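-- pv_equiv track=rewrite | github.com/nonstopfor/google_sps_transcompile | main.py | split_by_indent
-- ===== SOURCE A (Python) =====
-- def split_by_indent(source_code):
--     # 根据缩进分割python代码
--
--     lines = source_code.split("\n")
--     fragment = []
--     result = []
--     first = True
--     with_decorator = False
--
--     for line in lines:
--
--         if (len(line) == 0):
--             continue
--         first_word = line.split(' ')[0]
--
--         if (len(first_word) > 0 and first_word[0] == '@'):
--             with_decorator = True
--             if (first == False and len(fragment) > 0):
--                 result.append("".join(fragment))
--                 fragment = []
--             first = False
--
--         if (first_word == "def"):
--             if (with_decorator == True):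
--                 with_decorator = False
--             else:
--                 if (first == False and len(fragment) > 0):
--                     result.append("".join(fragment))
--                     fragment = []
--             first = False
--
--         fragment.append(line + '\n')
--
--     if (len(fragment) != 0):
--         result.append("".join(fragment))
--
--     return result
-- ===== SOURCE B (Python) =====
-- def split_by_indent(source_code):
--     # Two-phase: first compute fragment boundary indices over the non-empty
--     # lines, then slice and join. Same result as the inline-flush version.
--     lines = [l for l in source_code.split("\n") if len(l) > 0]
--     bounds = [0]
--     first = True
--     with_decorator = False
--     for i, line in enumerate(lines):
--         first_word = line.split(' ')[0]
--         if first_word.startswith('@'):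
--             if not first and i > 0:
--                 bounds.append(i)
--             first = False
--             with_decorator = True
--         elif first_word == "def":
--             if with_decorator:
--                 with_decorator = False
--             elif not first and i > 0:
--                 bounds.append(i)
--             first = False
--     bounds.append(len(lines))
--     return ["".join(l + '\n' for l in lines[a:b])
--             for a, b in zip(bounds, bounds[1:]) if a < b]
-- ===== Notes on version B (the rewrite author's own statement) =====
-- stated objective: alternative
-- what changed: Instead of flushing an accumulated fragment inline inside the loop, B first computes the boundary indices of fragments over the filtered non-empty lines with the same first/decorator state machine, then slices the line list at those boundaries and joins each group; boundary detection and fragment assembly are separate phases.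
import Mathlib
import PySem

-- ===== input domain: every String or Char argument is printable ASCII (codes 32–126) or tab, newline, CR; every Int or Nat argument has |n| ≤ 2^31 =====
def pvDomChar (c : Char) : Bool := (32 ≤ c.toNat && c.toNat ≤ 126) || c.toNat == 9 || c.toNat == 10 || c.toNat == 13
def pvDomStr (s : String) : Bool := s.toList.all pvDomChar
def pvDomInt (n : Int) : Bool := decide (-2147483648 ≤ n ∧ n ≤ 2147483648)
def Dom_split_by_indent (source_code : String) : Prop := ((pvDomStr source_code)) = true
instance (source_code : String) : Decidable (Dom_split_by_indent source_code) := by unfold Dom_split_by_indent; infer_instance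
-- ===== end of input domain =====

-- B separates boundary detection from fragment assembly instead of flushing a fragment inline; same result.

-- shared helper: line.split(' ')[0] (sep ≠ "" so split? is always some, and split(' ') always yields a non-empty list, so headD's default is never used)
def firstWordOf (line : String) : String := ((PySem.Str.split? line " ").getD []).headD ""

-- ===== PORT A =====
-- loop state: (fragment, result, first, with_decorator)
def stepA : (List String × List String × Bool × Bool) → String → (List String × List String × Bool × Bool)
  | (frag, res, first, deco), line =>
    if PySem.Str.len line = 0 then (frag, res, first, deco)   -- continue
    else
      let fw := firstWordOf line
      -- if len(first_word) > 0 and first_word[0] == '@'  (== pyGet? fw 0 = some '@')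
      let s1 : List String × List String × Bool × Bool :=
        if PySem.Str.pyGet? fw 0 = some '@' then
          if first = false ∧ 0 < frag.length then ([], res ++ [PySem.Str.join "" frag], false, true)
          else (frag, res, false, true)
        else (frag, res, first, deco)
      -- if first_word == "def"
      let s2 : List String × List String × Bool × Bool :=
        if fw = "def" then
          if s1.2.2.2 = true then (s1.1, s1.2.1, false, false)
          else if s1.2.2.1 = false ∧ 0 < s1.1.length then ([], s1.2.1 ++ [PySem.Str.join "" s1.1], false, s1.2.2.2)
          else (s1.1, s1.2.1, false, s1.2.2.2)
        else s1
      (s2.1 ++ [line ++ "\n"], s2.2.1, s2.2.2.1, s2.2.2.2)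

def split_by_indent (source_code : String) : List String :=
  let lines := (PySem.Str.split? source_code "\n").getD []
  let st := lines.foldl stepA ([], [], true, false)
  if st.1.length ≠ 0 then st.2.1 ++ [PySem.Str.join "" st.1] else st.2.1

-- ===== PORT B =====
-- pass 1 state: (bounds, first, with_decorator, i)
def stepB : (List Nat × Bool × Bool × Nat) → String → (List Nat × Bool × Bool × Nat)
  | (bounds, first, deco, i), line =>
    let fw := firstWordOf line
    if PySem.Str.startswith fw "@" then
      ((if first = false ∧ 0 < i then bounds ++ [i] else bounds), false, true, i + 1)
    else if fw = "def" then
      if deco = true then (bounds, false, false, i + 1)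
      else ((if first = false ∧ 0 < i then bounds ++ [i] else bounds), false, deco, i + 1)
    else (bounds, first, deco, i + 1)

def split_by_indent_alt (source_code : String) : List String :=
  let lines := ((PySem.Str.split? source_code "\n").getD []).filter (fun l => decide (0 < PySem.Str.len l))
  let st := lines.foldl stepB ([0], true, false, 0)
  let bs := st.1 ++ [lines.length]
  (bs.zip bs.tail).filterMap (fun p =>
    if p.1 < p.2 then
      some (PySem.Str.join "" (((lines.drop p.1).take (p.2 - p.1)).map (fun l => l ++ "\n")))
    else none)

-- ===== PRECONDITION & SPEC =====
def Spec_split_by_indent (source_code : String) (out : List String) : Prop := out = split_by_indent_alt source_code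
instance (source_code : String) (out : List String) : Decidable (Spec_split_by_indent source_code out) := by unfold Spec_split_by_indent; infer_instance

-- ===== CLAIM (what is proved, stated in full; the proofs are below) =====
def Claim_equal_split_by_indent : Prop := ∀ (source_code : String), Dom_split_by_indent source_code → Spec_split_by_indent source_code (split_by_indent source_code)

-- ===== LEMMAS AND PROOFS =====

-- the string B builds for the slice [a, b) of the non-empty lines
def grp (L : List String) (a b : Nat) : String :=
  PySem.Str.join "" (((L.drop a).take (b - a)).map (fun l => l ++ "\n"))

def emit (L : List String) (p : Nat × Nat) : Option String :=
  if p.1 < p.2 then some (grp L p.1 p.2) else none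

-- B's result as a function of the final bounds list
def outB (L : List String) (bs : List Nat) : List String :=
  ((bs ++ [L.length]).zip (bs ++ [L.length]).tail).filterMap (emit L)

-- A's final flush
def finalize : (List String × List String × Bool × Bool) → List String
  | (frag, res, _, _) => if frag.length ≠ 0 then res ++ [PySem.Str.join "" frag] else res

theorem startswith_at_iff (fw : String) :
    PySem.Str.startswith fw "@" = true ↔ PySem.Str.pyGet? fw 0 = some '@' := by
  simp only [PySem.Str.startswith_eq, PySem.Str.pyGet?_eq, PySem.Chars.pyGet?_eq_listPyGet?]
  rw [PySem.Chars.startswith_iff]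
  cases fw.toList with
  | nil => simp [PySem.List.pyGet?]
  | cons c cs =>
      rw [PySem.List.pyGet?_zero_cons]
      simp [List.cons_prefix_cons, eq_comm]

theorem def_not_at (fw : String) (h : PySem.Str.pyGet? fw 0 = some '@') : fw ≠ "def" := by
  intro he; subst he; revert h; decide

-- stepA case computations
theorem stepA_at (f r : List String) (fi d : Bool) (line : String)
    (hlen : ¬ PySem.Str.len line = 0) (h : PySem.Str.pyGet? (firstWordOf line) 0 = some '@') :
    stepA (f, r, fi, d) line =
      if fi = false ∧ 0 < f.length
      then ([line ++ "\n"], r ++ [PySem.Str.join "" f], false, true)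
      else (f ++ [line ++ "\n"], r, false, true) := by
  show (if PySem.Str.len line = 0 then _ else _) = _
  rw [if_neg hlen]
  simp only [h, if_neg (def_not_at _ h)]
  split_ifs <;> rfl

theorem stepA_def_deco (f r : List String) (fi : Bool) (line : String)
    (hlen : ¬ PySem.Str.len line = 0) (h : ¬ PySem.Str.pyGet? (firstWordOf line) 0 = some '@')
    (hd : firstWordOf line = "def") :
    stepA (f, r, fi, true) line = (f ++ [line ++ "\n"], r, false, false) := by
  show (if PySem.Str.len line = 0 then _ else _) = _
  rw [if_neg hlen]
  simp only [h, if_pos hd]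
  rfl

theorem stepA_def (f r : List String) (fi : Bool) (line : String)
    (hlen : ¬ PySem.Str.len line = 0) (h : ¬ PySem.Str.pyGet? (firstWordOf line) 0 = some '@')
    (hd : firstWordOf line = "def") :
    stepA (f, r, fi, false) line =
      if fi = false ∧ 0 < f.length
      then ([line ++ "\n"], r ++ [PySem.Str.join "" f], false, false)
      else (f ++ [line ++ "\n"], r, false, false) := by
  show (if PySem.Str.len line = 0 then _ else _) = _
  rw [if_neg hlen]
  simp only [h, if_pos hd]
  split_ifs <;> simp_all

theorem stepA_other (f r : List String) (fi d : Bool) (line : String)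
    (hlen : ¬ PySem.Str.len line = 0) (h : ¬ PySem.Str.pyGet? (firstWordOf line) 0 = some '@')
    (hd : ¬ firstWordOf line = "def") :
    stepA (f, r, fi, d) line = (f ++ [line ++ "\n"], r, fi, d) := by
  show (if PySem.Str.len line = 0 then _ else _) = _
  rw [if_neg hlen]
  simp only [if_neg h, if_neg hd]

-- stepB case computations
theorem stepB_at (bs : List Nat) (fi d : Bool) (i : Nat) (line : String)
    (h : PySem.Str.pyGet? (firstWordOf line) 0 = some '@') :
    stepB (bs, fi, d, i) line =
      ((if fi = false ∧ 0 < i then bs ++ [i] else bs), false, true, i + 1) := by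
  show (if PySem.Str.startswith (firstWordOf line) "@" = true then _ else _) = _
  rw [if_pos ((startswith_at_iff _).2 h)]

theorem stepB_def_deco (bs : List Nat) (fi : Bool) (i : Nat) (line : String)
    (h : ¬ PySem.Str.pyGet? (firstWordOf line) 0 = some '@')
    (hd : firstWordOf line = "def") :
    stepB (bs, fi, true, i) line = (bs, false, false, i + 1) := by
  show (if PySem.Str.startswith (firstWordOf line) "@" = true then _ else _) = _
  rw [if_neg (fun hc => h ((startswith_at_iff _).1 hc)), if_pos hd, if_pos rfl]

theorem stepB_def (bs : List Nat) (fi : Bool) (i : Nat) (line : String)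
    (h : ¬ PySem.Str.pyGet? (firstWordOf line) 0 = some '@')
    (hd : firstWordOf line = "def") :
    stepB (bs, fi, false, i) line =
      ((if fi = false ∧ 0 < i then bs ++ [i] else bs), false, false, i + 1) := by
  show (if PySem.Str.startswith (firstWordOf line) "@" = true then _ else _) = _
  rw [if_neg (fun hc => h ((startswith_at_iff _).1 hc)), if_pos hd, if_neg (by simp)]

theorem stepB_other (bs : List Nat) (fi d : Bool) (i : Nat) (line : String)
    (h : ¬ PySem.Str.pyGet? (firstWordOf line) 0 = some '@')
    (hd : ¬ firstWordOf line = "def") :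
    stepB (bs, fi, d, i) line = (bs, fi, d, i + 1) := by
  show (if PySem.Str.startswith (firstWordOf line) "@" = true then _ else _) = _
  rw [if_neg (fun hc => h ((startswith_at_iff _).1 hc)), if_neg hd]

theorem zip_pairs_concat (bs : List Nat) (lb j : Nat) (h : bs.getLast? = some lb) :
    (bs ++ [j]).zip ((bs ++ [j]).tail) = bs.zip bs.tail ++ [(lb, j)] := by
  induction bs with
  | nil => simp at h
  | cons a t ih =>
      cases t with
      | nil => simp at h; subst h; simp
      | cons b t' =>
          have h' : (b :: t').getLast? = some lb := by
            simpa [List.getLast?_cons_cons] using h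
          have := ih h'
          simp only [List.cons_append, List.tail_cons, List.zip_cons_cons] at *
          rw [this]

-- the loop invariant: A's state after the non-empty lines before index i equals B's
-- slicing of the bounds recorded so far; lb is the last recorded bound
theorem main_inv (L : List String) (hL : ∀ x ∈ L, ¬ PySem.Str.len x = 0) :
    ∀ (rem : List String) (i : Nat) (bounds : List Nat) (lb : Nat) (first deco : Bool),
      rem = L.drop i → i ≤ L.length → bounds.getLast? = some lb →
      (lb < i ∨ (i = 0 ∧ lb = 0 ∧ bounds = [0])) →
      finalize (rem.foldl stepA
        (((L.drop lb).take (i - lb)).map (fun l => l ++ "\n"),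
         (bounds.zip bounds.tail).filterMap (emit L), first, deco))
      = outB L (rem.foldl stepB (bounds, first, deco, i)).1 := by
  intro rem
  induction rem with
  | nil =>
      intro i bounds lb first deco hrem hi hlast hinv
      have hiL : i = L.length := by
        have := List.drop_eq_nil_iff.mp hrem.symm
        omega
      subst hiL
      simp only [List.foldl_nil]
      rw [outB, zip_pairs_concat bounds lb L.length hlast, List.filterMap_append]
      rcases hinv with hlt | ⟨hi0, hlb0, hb0⟩
      · have hfrag : (((L.drop lb).take (L.length - lb)).map (fun l => l ++ "\n")).length ≠ 0 := by
          simp [List.length_take, List.length_drop]; omega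
        show finalize _ = _
        rw [finalize, if_pos hfrag]
        have : List.filterMap (emit L) [(lb, L.length)] = [grp L lb L.length] := by
          simp [emit, hlt]
        rw [this]
        rfl
      · have hL0 : L = [] := by
          have : L.length = 0 := by omega
          exact List.length_eq_zero_iff.mp this
        subst hL0 hlb0
        show finalize _ = _
        rw [finalize]
        simp [emit]
  | cons x rem' ih =>
      intro i bounds lb first deco hrem hi hlast hinv
      have hilt : i < L.length := by
        by_contra hc
        rw [List.drop_eq_nil_iff.mpr (by omega)] at hrem
        simp at hrem
      have hcons : x :: rem' = L[i] :: L.drop (i + 1) :=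
        hrem.trans (List.drop_eq_getElem_cons hilt)
      injection hcons with hx hrem'
      have hxmem : x ∈ L := by rw [hx]; exact List.getElem_mem hilt
      have hxlen : ¬ PySem.Str.len x = 0 := hL x hxmem
      have hlbi : lb ≤ i := by omega
      have hcond : (first = false ∧ 0 < (((L.drop lb).take (i - lb)).map (fun l => l ++ "\n")).length)
          ↔ (first = false ∧ 0 < i) := by
        simp only [List.length_map, List.length_take, List.length_drop]
        constructor
        · rintro ⟨h1, h2⟩; exact ⟨h1, by omega⟩
        · rintro ⟨h1, h2⟩
          refine ⟨h1, ?_⟩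
          have : lb < i := by rcases hinv with h | ⟨h, _⟩ <;> omega
          omega
      have hxL : L.drop i = x :: L.drop (i + 1) := by
        rw [List.drop_eq_getElem_cons hilt, ← hx]
      have hIdx : L[i]? = some x := by rw [hx]; exact List.getElem?_eq_getElem hilt
      have htake : ((L.drop lb).take (i + 1 - lb)).map (fun l => l ++ "\n")
          = ((L.drop lb).take (i - lb)).map (fun l => l ++ "\n") ++ [x ++ "\n"] := by
        have h1 : i + 1 - lb = (i - lb) + 1 := by omega
        rw [h1, List.take_add_one, List.getElem?_drop]
        have h2 : lb + (i - lb) = i := by omega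
        rw [h2, hIdx]
        simp
      have hnewfrag : ((L.drop i).take (i + 1 - i)).map (fun l => l ++ "\n") = [x ++ "\n"] := by
        have h1 : i + 1 - i = 1 := by omega
        rw [h1, hxL]
        simp
      have hlast' : (bounds ++ [i]).getLast? = some i := by simp
      by_cases hat : PySem.Str.pyGet? (firstWordOf x) 0 = some '@'
      · rw [List.foldl_cons, List.foldl_cons, stepA_at _ _ _ _ _ hxlen hat, stepB_at _ _ _ _ _ hat]
        by_cases hc : first = false ∧ 0 < i
        · have hlt : lb < i := by rcases hinv with h | ⟨h, _⟩ <;> omega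
          rw [if_pos (hcond.mpr hc), if_pos hc]
          have hres : (List.filterMap (emit L) (bounds.zip bounds.tail))
              ++ [PySem.Str.join "" (((L.drop lb).take (i - lb)).map (fun l => l ++ "\n"))]
              = List.filterMap (emit L) ((bounds ++ [i]).zip ((bounds ++ [i]).tail)) := by
            rw [zip_pairs_concat _ _ _ hlast, List.filterMap_append]
            congr 1
            simp [emit, hlt, grp]
          rw [← hnewfrag, hres]
          exact ih (i + 1) (bounds ++ [i]) i false true hrem' (by omega) hlast' (by omega)
        · rw [if_neg (fun hh => hc (hcond.mp hh)), if_neg hc, ← htake]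
          exact ih (i + 1) bounds lb false true hrem' (by omega) hlast (by omega)
      · by_cases hdef : firstWordOf x = "def"
        · cases deco with
          | true =>
              rw [List.foldl_cons, List.foldl_cons, stepA_def_deco _ _ _ _ hxlen hat hdef,
                stepB_def_deco _ _ _ _ hat hdef, ← htake]
              exact ih (i + 1) bounds lb false false hrem' (by omega) hlast (by omega)
          | false =>
              rw [List.foldl_cons, List.foldl_cons, stepA_def _ _ _ _ hxlen hat hdef,
                stepB_def _ _ _ _ hat hdef]
              by_cases hc : first = false ∧ 0 < i
              · have hlt : lb < i := by rcases hinv with h | ⟨h, _⟩ <;> omega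
                rw [if_pos (hcond.mpr hc), if_pos hc]
                have hres : (List.filterMap (emit L) (bounds.zip bounds.tail))
                    ++ [PySem.Str.join "" (((L.drop lb).take (i - lb)).map (fun l => l ++ "\n"))]
                    = List.filterMap (emit L) ((bounds ++ [i]).zip ((bounds ++ [i]).tail)) := by
                  rw [zip_pairs_concat _ _ _ hlast, List.filterMap_append]
                  congr 1
                  simp [emit, hlt, grp]
                rw [← hnewfrag, hres]
                exact ih (i + 1) (bounds ++ [i]) i false false hrem' (by omega) hlast' (by omega)
              · rw [if_neg (fun hh => hc (hcond.mp hh)), if_neg hc, ← htake]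
                exact ih (i + 1) bounds lb false false hrem' (by omega) hlast (by omega)
        · rw [List.foldl_cons, List.foldl_cons, stepA_other _ _ _ _ _ hxlen hat hdef,
            stepB_other _ _ _ _ _ hat hdef, ← htake]
          exact ih (i + 1) bounds lb first deco hrem' (by omega) hlast (by omega)

theorem stepA_skip (st : List String × List String × Bool × Bool) (l : String)
    (h : PySem.Str.len l = 0) : stepA st l = st := by
  obtain ⟨f,r,fi,d⟩ := st
  show (if PySem.Str.len l = 0 then _ else _) = _
  rw [if_pos h]

-- A skips empty lines, so its fold equals the fold over the filtered lines B uses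
theorem skip_foldl (L : List String) : ∀ (s : List String × List String × Bool × Bool),
    L.foldl stepA s = (L.filter (fun l => decide (0 < PySem.Str.len l))).foldl stepA s := by
  induction L with
  | nil => intro s; rfl
  | cons x t ih =>
      intro s
      by_cases h : 0 < PySem.Str.len x
      · rw [List.filter_cons, if_pos (by simpa using h), List.foldl_cons, List.foldl_cons, ih]
      · have h0 : PySem.Str.len x = 0 := by
          rw [PySem.Str.len_eq] at h ⊢; omega
        rw [List.filter_cons, if_neg (by simpa using h), List.foldl_cons, stepA_skip _ _ h0, ih]

theorem AB (s : String) : split_by_indent s = split_by_indent_alt s := by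
  have hL : ∀ x ∈ (((PySem.Str.split? s "\n").getD []).filter (fun l => decide (0 < PySem.Str.len l))),
      ¬ PySem.Str.len x = 0 := by
    intro x hx
    have h2 := (List.mem_filter.mp hx).2
    simp only [decide_eq_true_eq] at h2
    omega
  have h := main_inv _ hL _ 0 [0] 0 true false List.drop_zero.symm (Nat.zero_le _) rfl
    (Or.inr ⟨rfl, rfl, rfl⟩)
  simp only [Nat.sub_self, List.take_zero, List.map_nil, List.drop_zero, List.tail_cons,
    List.zip_nil_right, List.filterMap_nil] at h
  simp only [split_by_indent, split_by_indent_alt]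
  rw [skip_foldl]
  exact h

-- ===== VERDICT (by name: the statement is the Claim_ definition above) =====
theorem split_by_indent_spec : Claim_equal_split_by_indent := by
  intro s _
  show split_by_indent s = split_by_indent_alt s
  exact AB s
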